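-- pv_equiv track=rewrite | github.com/BuzzScud/ALGO3D | math/math 2/integrate_geometric_arithmetic.py | find_section_boundaries
-- ===== SOURCE A (Python) =====
-- def find_section_boundaries(lines, section_marker):
--     """Find start and end of a section."""
--     start = None
--     end = None
--
--     for i, line in enumerate(lines):
--         if section_marker in line and start is None:
--             start = i
--         elif start is not None and line.startswith('## ') and section_marker not in line:
--             end = i
--             break
--
--     if end is None:
--         end = len(lines)
--
--     return start, end
-- ===== SOURCE B (Python) =====
-- def find_section_boundaries(lines, section_marker):
--     """Find start and end of a section via precomputed index sets."""
--     marker_hits = [i for i, line in enumerate(lines) if section_marker in line]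
--     if not marker_hits:
--         return None, len(lines)
--     start = marker_hits[0]
--     hit_set = set(marker_hits)
--     headers = [i for i, line in enumerate(lines) if line.startswith('## ')]
--     end = next((j for j in headers if j > start and j not in hit_set), len(lines))
--     return start, end
-- ===== Notes on version B (the rewrite author's own statement) =====
-- stated objective: alternative
-- what changed: Replaced A's single stateful scan by an index-set formulation: precompute the list of marker-hit indices and the list of '## ' header indices, take start as the first hit, and pick end as the first header index after start that is not in the hit set.
import Mathlib
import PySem

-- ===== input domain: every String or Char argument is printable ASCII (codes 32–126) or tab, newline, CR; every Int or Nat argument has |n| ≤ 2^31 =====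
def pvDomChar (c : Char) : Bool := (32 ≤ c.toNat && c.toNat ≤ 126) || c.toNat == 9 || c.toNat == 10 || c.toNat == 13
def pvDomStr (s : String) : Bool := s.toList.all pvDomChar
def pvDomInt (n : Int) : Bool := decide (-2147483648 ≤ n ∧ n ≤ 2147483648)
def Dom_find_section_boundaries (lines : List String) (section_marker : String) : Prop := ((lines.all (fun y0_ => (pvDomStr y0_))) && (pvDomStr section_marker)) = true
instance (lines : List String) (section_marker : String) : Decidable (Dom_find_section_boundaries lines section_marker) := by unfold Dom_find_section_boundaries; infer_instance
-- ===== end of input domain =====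

-- B recasts A's single stateful scan as an index-set computation: precompute marker-hit
-- indices and '## ' header indices, take the first hit as start, and pick end as the first
-- header after start that is not a hit.

-- ===== PORT A =====
-- A's single loop: state (start, end-if-broken); break modelled by returning.
def fsbLoopA (marker : String) (i : Int) (start : Option Int) : List String → Option Int × Option Int
  | [] => (start, none)
  | line :: rest =>
    if PySem.Str.isIn marker line && start.isNone then
      fsbLoopA marker (i + 1) (some i) rest
    else if start.isSome && PySem.Str.startswith line "## " && !(PySem.Str.isIn marker line) then
      (start, some i)
    else
      fsbLoopA marker (i + 1) start rest

def find_section_boundaries (lines : List String) (section_marker : String) : Option Int × Int :=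
  let r := fsbLoopA section_marker 0 none lines
  (r.1, r.2.getD (lines.length : Int))

-- ===== PORT B =====
-- [i for i, line in enumerate(lines) if p(line)]
def fsbIdxWhere (p : String → Bool) (i : Int) : List String → List Int
  | [] => []
  | line :: rest => if p line then i :: fsbIdxWhere p (i + 1) rest else fsbIdxWhere p (i + 1) rest

-- next((j for j in headers if j > start and j not in hit_set), dflt)
def fsbPickEnd (start : Int) (hitSet : PySem.Set Int) (dflt : Int) : List Int → Int
  | [] => dflt
  | j :: rest =>
    if j > start && !(PySem.Set.contains hitSet j) then j else fsbPickEnd start hitSet dflt rest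

def find_section_boundaries_alt (lines : List String) (section_marker : String) : Option Int × Int :=
  let markerHits := fsbIdxWhere (fun line => PySem.Str.isIn section_marker line) 0 lines
  match markerHits with
  | [] => (none, (lines.length : Int))
  | s :: _ =>
    let hitSet : PySem.Set Int := PySem.Set.ofList markerHits
    let headers := fsbIdxWhere (fun line => PySem.Str.startswith line "## ") 0 lines
    (some s, fsbPickEnd s hitSet (lines.length : Int) headers)

-- ===== PRECONDITION & SPEC =====
def Spec_find_section_boundaries (lines : List String) (section_marker : String) (out : Option Int × Int) : Prop := out = find_section_boundaries_alt lines section_marker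
instance (lines : List String) (section_marker : String) (out : Option Int × Int) : Decidable (Spec_find_section_boundaries lines section_marker out) := by unfold Spec_find_section_boundaries; infer_instance

-- ===== CLAIM (what is proved, stated in full; the proofs are below) =====
def Claim_equal_find_section_boundaries : Prop := ∀ (lines : List String) (section_marker : String), Dom_find_section_boundaries lines section_marker → Spec_find_section_boundaries lines section_marker (find_section_boundaries lines section_marker)

-- ===== LEMMAS AND PROOFS =====

-- Intermediate form of A: once start is set, remaining loop is a plain end-search.
def fsbFindEnd (marker : String) (j : Int) (dflt : Int) : List String → Int
  | [] => dflt
  | line :: rest =>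
    if PySem.Str.startswith line "## " && !(PySem.Str.isIn marker line) then j
    else fsbFindEnd marker (j + 1) dflt rest

lemma fsbLoopA_some (marker : String) (s : Int) :
    ∀ (rest : List String) (i dflt : Int),
      (let r := fsbLoopA marker i (some s) rest; (r.1, r.2.getD dflt)) =
        (some s, fsbFindEnd marker i dflt rest) := by
  intro rest
  induction rest with
  | nil => intro i dflt; simp [fsbLoopA, fsbFindEnd]
  | cons line rest ih =>
    intro i dflt
    simp only [fsbLoopA, fsbFindEnd, Option.isNone_some, Bool.and_false, Bool.false_eq_true,
      if_false, Option.isSome_some, Bool.true_and]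
    split_ifs with h
    · simp
    · exact ih (i + 1) dflt

-- membership in fsbIdxWhere: exactly the offsets whose line satisfies p
lemma mem_fsbIdxWhere (p : String → Bool) :
    ∀ (ls : List String) (i j : Int),
      j ∈ fsbIdxWhere p i ls ↔ ∃ k : Nat, ∃ hk : k < ls.length, j = i + k ∧ p ls[k] = true := by
  intro ls
  induction ls with
  | nil => intro i j; simp [fsbIdxWhere]
  | cons line rest ih =>
    intro i j
    simp only [fsbIdxWhere]
    constructor
    · intro h
      split_ifs at h with hp
      · rcases List.mem_cons.mp h with h0 | h1
        · exact ⟨0, by simp, by simpa using h0, by simpa using hp⟩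
        · rcases (ih (i + 1) j).mp h1 with ⟨k, hk, hj, hpk⟩
          exact ⟨k + 1, by simpa using hk, by push_cast at hj ⊢; omega, by simpa using hpk⟩
      · rcases (ih (i + 1) j).mp h with ⟨k, hk, hj, hpk⟩
        exact ⟨k + 1, by simpa using hk, by push_cast at hj ⊢; omega, by simpa using hpk⟩
    · rintro ⟨k, hk, hj, hpk⟩
      cases k with
      | zero =>
        simp only [List.getElem_cons_zero] at hpk
        simp only [hpk, if_true]
        exact List.mem_cons.mpr (Or.inl (by omega))
      | succ k =>
        have hk' : k < rest.length := by simpa using hk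
        have hmem : j ∈ fsbIdxWhere p (i + 1) rest := by
          refine (ih (i + 1) j).mpr ⟨k, hk', by push_cast at hj ⊢; omega, by simpa using hpk⟩
        split_ifs
        · exact List.mem_cons.mpr (Or.inr hmem)
        · exact hmem

-- head of the hit list = A's start search result (first marker index, if any)
def fsbFindStart (marker : String) (i : Int) : List String → Option Int
  | [] => none
  | line :: rest => if PySem.Str.isIn marker line then some i else fsbFindStart marker (i + 1) rest

lemma head_fsbIdxWhere (marker : String) :
    ∀ (ls : List String) (i : Int),
      (fsbIdxWhere (fun line => PySem.Str.isIn marker line) i ls).head? = fsbFindStart marker i ls := by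
  intro ls
  induction ls with
  | nil => intro i; simp [fsbIdxWhere, fsbFindStart]
  | cons line rest ih =>
    intro i
    simp only [fsbIdxWhere, fsbFindStart]
    split_ifs with h
    · simp
    · exact ih (i + 1)

-- A's whole loop with start unset equals: find first hit, then end-search from s+1.
lemma fsbLoopA_none (marker : String) :
    ∀ (rest : List String) (lines : List String) (i : Nat), rest = lines.drop i → ∀ dflt : Int,
      (let r := fsbLoopA marker (i : Int) none rest; (r.1, r.2.getD dflt)) =
        (match fsbFindStart marker (i : Int) rest with
         | none => (none, dflt)
         | some s => (some s, fsbFindEnd marker (s + 1) dflt (lines.drop (s.toNat + 1)))) := by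
  intro rest
  induction rest with
  | nil => intro lines i _ dflt; simp [fsbLoopA, fsbFindStart]
  | cons line rest ih =>
    intro lines i hdrop dflt
    have htail : rest = lines.drop (i + 1) := by
      have := congrArg List.tail hdrop
      simpa [List.tail_drop] using this
    by_cases h : PySem.Str.isIn marker line = true
    · simp only [fsbLoopA, fsbFindStart, h, Option.isNone_none, Bool.and_true, if_pos]
      have := fsbLoopA_some marker (i : Int) rest ((i : Int) + 1) dflt
      have hnat : ((i : Int)).toNat + 1 = i + 1 := by omega
      rw [hnat, ← htail]
      exact this
    · simp only [fsbLoopA, fsbFindStart, h, Bool.false_and, Bool.false_eq_true, if_false,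
        Option.isSome_none, Bool.false_and, Bool.false_eq_true, if_false]
      have := ih lines (i + 1) htail dflt
      have hcast : ((i : Int) + 1) = ((i + 1 : Nat) : Int) := by push_cast; ring
      rw [hcast]
      exact this

-- Header indices at or before start are skipped by the j > start test, so the pick
-- over the full header list equals the pick over the headers of the suffix after start.
lemma fsbPickEnd_skip (p : String → Bool) (s : Int) (H : PySem.Set Int) (dflt : Int) :
    ∀ (ls lines : List String) (i : Nat), ls = lines.drop i → (i : Int) ≤ s →
      fsbPickEnd s H dflt (fsbIdxWhere p (i : Int) ls) =
        fsbPickEnd s H dflt (fsbIdxWhere p (s + 1) (lines.drop (s.toNat + 1))) := by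
  intro ls
  induction ls with
  | nil =>
    intro lines i hdrop hle
    have hlen : lines.length ≤ i := by
      by_contra hc
      have : lines.drop i ≠ [] := by
        simp [List.drop_eq_nil_iff]; omega
      exact this hdrop.symm
    have : lines.drop (s.toNat + 1) = [] := by
      rw [List.drop_eq_nil_iff]; omega
    simp [this, fsbIdxWhere]
  | cons line rest ih =>
    intro lines i hdrop hle
    have htail : rest = lines.drop (i + 1) := by
      have := congrArg List.tail hdrop
      simpa [List.tail_drop] using this
    have hred : fsbPickEnd s H dflt (fsbIdxWhere p (i : Int) (line :: rest)) =
        fsbPickEnd s H dflt (fsbIdxWhere p ((i : Int) + 1) rest) := by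
      simp only [fsbIdxWhere]
      split_ifs
      · simp only [fsbPickEnd]
        rw [if_neg (by simp; omega)]
      · rfl
    rw [hred]
    by_cases hcase : ((i : Int) + 1) ≤ s
    · have := ih lines (i + 1) htail (by push_cast; omega)
      have hcast : ((i : Int) + 1) = ((i + 1 : Nat) : Int) := by push_cast; ring
      rw [hcast]
      exact this
    · have hi : (i : Int) = s := by omega
      have hnat : s.toNat + 1 = i + 1 := by omega
      rw [hi, hnat, ← htail]

-- B's pick over the header index list equals A's end-search over the suffix,
-- given a hit set that answers marker membership at every scanned offset.
lemma fsbPickEnd_eq_findEnd (marker : String) (s : Int) (H : PySem.Set Int) :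
    ∀ (ls : List String) (i dflt : Int), s < i →
      (∀ (k : Nat) (hk : k < ls.length),
        PySem.Set.contains H (i + k) = PySem.Str.isIn marker ls[k]) →
      fsbPickEnd s H dflt (fsbIdxWhere (fun line => PySem.Str.startswith line "## ") i ls) =
        fsbFindEnd marker i dflt ls := by
  intro ls
  induction ls with
  | nil => intro i dflt _ _; simp [fsbIdxWhere, fsbFindEnd, fsbPickEnd]
  | cons line rest ih =>
    intro i dflt hsi hH
    have hH0 : PySem.Set.contains H i = PySem.Str.isIn marker line := by
      have := hH 0 (by simp)
      simpa using this
    have hHrest : ∀ (k : Nat) (hk : k < rest.length),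
        PySem.Set.contains H ((i + 1) + k) = PySem.Str.isIn marker rest[k] := by
      intro k hk
      have := hH (k + 1) (by simpa using hk)
      have harith : i + ((k : Int) + 1) = (i + 1) + k := by ring
      push_cast at this
      rw [harith] at this
      simpa using this
    simp only [fsbIdxWhere, fsbFindEnd]
    by_cases hsw : PySem.Str.startswith line "## " = true
    · simp only [hsw, if_true, Bool.true_and, fsbPickEnd]
      by_cases hin : PySem.Str.isIn marker line = true
      · simp only [hH0, hin, Bool.not_true, Bool.and_false, Bool.false_eq_true, if_false]
        exact ih (i + 1) dflt (by omega) hHrest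
      · have hin' : PySem.Str.isIn marker line = false := by
          cases hx : PySem.Str.isIn marker line <;> simp_all
        simp only [hH0, hin', Bool.not_false, Bool.and_true]
        rw [if_pos (by simpa using hsi), if_pos (by simp)]
    · have hsw' : PySem.Str.startswith line "## " = false := by
        cases hx : PySem.Str.startswith line "## " <;> simp_all
      simp only [hsw', Bool.false_eq_true, if_false, Bool.false_and]
      exact ih (i + 1) dflt (by omega) hHrest

-- ===== VERDICT (by name: the statement is the Claim_ definition above) =====
theorem find_section_boundaries_spec : Claim_equal_find_section_boundaries := by
  intro lines marker _
  unfold Spec_find_section_boundaries find_section_boundaries find_section_boundaries_alt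
  have h := fsbLoopA_none marker lines lines 0 (by simp) (lines.length : Int)
  simp only [Nat.cast_zero] at h
  rw [h]
  rw [← head_fsbIdxWhere marker lines 0]
  cases hl : fsbIdxWhere (fun line => PySem.Str.isIn marker line) 0 lines with
  | nil => simp
  | cons s t =>
    simp only [List.head?_cons]
    have hs_mem : s ∈ fsbIdxWhere (fun line => PySem.Str.isIn marker line) 0 lines := by
      rw [hl]; exact List.mem_cons_self
    rcases (mem_fsbIdxWhere _ lines 0 s).mp hs_mem with ⟨ks, hks, hsk, _⟩
    have hs_nonneg : 0 ≤ s := by omega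
    rw [← hl]
    have hskip := fsbPickEnd_skip (fun line => PySem.Str.startswith line "## ") s
      (PySem.Set.ofList (fsbIdxWhere (fun line => PySem.Str.isIn marker line) 0 lines))
      (lines.length : Int) lines lines 0 (by simp) (by simpa using hs_nonneg)
    simp only [Nat.cast_zero] at hskip
    rw [hskip]
    rw [fsbPickEnd_eq_findEnd marker s
      (PySem.Set.ofList (fsbIdxWhere (fun line => PySem.Str.isIn marker line) 0 lines))
      (lines.drop (s.toNat + 1)) (s + 1) (lines.length : Int) (by omega) ?_]
    intro k hk
    have hget : (lines.drop (s.toNat + 1))[k] = lines[s.toNat + 1 + k]'(by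
        have := List.length_drop (l := lines) (i := s.toNat + 1)
        omega) := by
      rw [List.getElem_drop]
    rw [hget]
    have hlen : s.toNat + 1 + k < lines.length := by
      have := List.length_drop (l := lines) (i := s.toNat + 1)
      omega
    rw [Bool.eq_iff_iff, PySem.Set.contains_iff, PySem.Set.mem_ofList, mem_fsbIdxWhere]
    constructor
    · rintro ⟨k', hk', hjk, hpk⟩
      have : k' = s.toNat + 1 + k := by omega
      subst this
      exact hpk
    · intro hin
      exact ⟨s.toNat + 1 + k, hlen, by omega, hin⟩
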